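-- pv_equiv track=rewrite | github.com/isaigm/Examples | littlewood.py | littlewood
-- ===== SOURCE A (Python) =====
-- def littlewood(m, n, pl):
--     if len(pl) == m + 1:
--         yield pl[::-1]
--     if n < 0:
--         return
--     pl.append(1)
--     for p in littlewood(m, n - 1, pl):
--         yield p
--     pl.pop()
--     pl.append(-1)
--     for p in littlewood(m, n - 1, pl):
--         yield p
--     pl.pop()
-- ===== SOURCE B (Python) =====
-- def littlewood(m, n, pl):
--     # Closed-form enumeration of the d = m+1-len(pl) free +-1 positions,
--     # replacing A's recursive append/pop tree; same yield order (DFS preorder).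
--     d = m + 1 - len(pl)
--     if d < 0 or (d > 0 and d > n + 1):
--         return
--     rev = pl[::-1]
--     for i in range(2 ** d):
--         combo = []
--         x = i
--         for _ in range(d):
--             combo.append(1 if x % 2 == 0 else -1)
--             x //= 2
--         yield combo + rev
-- ===== Notes on version B (the rewrite author's own statement) =====
-- stated objective: alternative
-- what changed: Replaces the O(2^n) recursive append/pop tree (which always recurses to depth n+1 even when nothing can be yielded) by computing d = m+1-len(pl), guarding 0 <= d and (d = 0 or d <= n+1), and directly enumerating the 2^d sign vectors from the bits of a counter, in A's DFS preorder; Pre_ excludes n > 900, where A's unconditional depth-(n+1) recursion overflows CPython's default recursion limit (RecursionError) while B needs no recursion.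
import Mathlib
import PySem

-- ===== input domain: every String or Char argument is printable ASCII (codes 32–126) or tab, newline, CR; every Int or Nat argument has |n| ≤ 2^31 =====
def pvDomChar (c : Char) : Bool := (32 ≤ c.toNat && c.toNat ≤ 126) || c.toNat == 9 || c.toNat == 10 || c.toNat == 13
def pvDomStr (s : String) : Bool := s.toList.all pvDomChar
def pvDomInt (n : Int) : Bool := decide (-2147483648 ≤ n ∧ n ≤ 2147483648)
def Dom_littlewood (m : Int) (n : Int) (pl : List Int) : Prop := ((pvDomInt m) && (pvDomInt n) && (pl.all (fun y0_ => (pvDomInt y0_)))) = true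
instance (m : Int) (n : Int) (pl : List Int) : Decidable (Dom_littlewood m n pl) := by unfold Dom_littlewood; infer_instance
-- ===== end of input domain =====

-- B enumerates the 2^d free sign choices (d = m+1-len(pl)) from a counter's bits instead of
-- A's recursive append/pop tree; equivalence is about the yielded sequence (A's generator
-- temporarily mutates pl but restores it).

-- ===== PORT A =====
-- generator collected into a list; pl[::-1] is pl.reverse (PySem.List.slice?_none_none_neg_one)
def littlewood (m : Int) (n : Int) (pl : List Int) : List (List Int) :=
  let base := if (pl.length : Int) = m + 1 then [pl.reverse] else []
  if n < 0 then base
  else base ++ littlewood m (n - 1) (pl ++ [1]) ++ littlewood m (n - 1) (pl ++ [-1])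
termination_by (n + 1).toNat
decreasing_by all_goals omega

-- ===== PORT B =====
-- the inner loop of Source B: d iterations of 'append(1 if x % 2 == 0 else -1); x //= 2'
def pvCombo (x : Int) (d : Nat) : List Int :=
  match d with
  | 0 => []
  | d' + 1 =>
      (if PySem.Int.mod x 2 = 0 then (1 : Int) else -1) :: pvCombo (PySem.Int.floordiv x 2) d'

def littlewood_alt (m : Int) (n : Int) (pl : List Int) : List (List Int) :=
  let d := m + 1 - (pl.length : Int)
  if d < 0 ∨ (0 < d ∧ n + 1 < d) then []
  else (PySem.List.pyRange 0 (2 ^ d.toNat) 1).map (fun i => pvCombo i d.toNat ++ pl.reverse)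

-- ===== PRECONDITION & SPEC =====
-- A recurses to depth n+1 on EVERY input (even when nothing can be yielded), so for large n
-- CPython raises RecursionError; Pre_ keeps n safely below the default recursion limit of 1000.
def Pre_littlewood (m : Int) (n : Int) (pl : List Int) : Prop := n ≤ 900
instance (m : Int) (n : Int) (pl : List Int) : Decidable (Pre_littlewood m n pl) := by unfold Pre_littlewood; infer_instance
def pvWitness_littlewood : Int × Int × List Int := (2, 3, [1])

def Spec_littlewood (m : Int) (n : Int) (pl : List Int) (out : List (List Int)) : Prop := out = littlewood_alt m n pl
instance (m : Int) (n : Int) (pl : List Int) (out : List (List Int)) : Decidable (Spec_littlewood m n pl out) := by unfold Spec_littlewood; infer_instance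

-- ===== CLAIM (what is proved, stated in full; the proofs are below) =====
def Claim_equal_littlewood : Prop := ∀ (m : Int) (n : Int) (pl : List Int), Dom_littlewood m n pl → Pre_littlewood m n pl → Spec_littlewood m n pl (littlewood m n pl)

-- ===== LEMMAS AND PROOFS =====

lemma pvCombo_succ (y : Int) (k : Nat) :
    pvCombo y (k + 1)
      = (if PySem.Int.mod y 2 = 0 then (1 : Int) else -1) :: pvCombo (PySem.Int.floordiv y 2) k := rfl

lemma natCast_mod_two (x : Nat) : PySem.Int.mod (x : Int) 2 = ((x % 2 : Nat) : Int) := by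
  rw [PySem.Int.mod_eq_emod_of_pos (by norm_num : (0:Int) < 2)]; push_cast; rfl

lemma natCast_div_two (x : Nat) : PySem.Int.floordiv (x : Int) 2 = ((x / 2 : Nat) : Int) := by
  rw [PySem.Int.floordiv_eq_ediv_of_pos (by norm_num : (0:Int) < 2)]; push_cast; rfl

lemma pvCombo_low (d x : Nat) (h : x < 2 ^ d) :
    pvCombo (x : Int) (d + 1) = pvCombo (x : Int) d ++ [1] := by
  induction d generalizing x with
  | zero => interval_cases x; decide
  | succ d ih =>
      have h2 : 2 ^ (d + 1) = 2 * 2 ^ d := by ring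
      have hx2 : x / 2 < 2 ^ d := by omega
      rw [pvCombo_succ _ (d + 1), natCast_mod_two, natCast_div_two, ih _ hx2,
        pvCombo_succ _ d, natCast_mod_two, natCast_div_two]
      simp

lemma pvCombo_high (d x : Nat) (h : x < 2 ^ d) :
    pvCombo ((x : Int) + 2 ^ d) (d + 1) = pvCombo (x : Int) d ++ [-1] := by
  induction d generalizing x with
  | zero => interval_cases x; decide
  | succ d ih =>
      have h2 : 2 ^ (d + 1) = 2 * 2 ^ d := by ring
      have hx2 : x / 2 < 2 ^ d := by omega
      have hc : (x : Int) + 2 ^ (d + 1) = ((x + 2 ^ (d + 1) : Nat) : Int) := by push_cast; ring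
      have hm : (x + 2 ^ (d + 1)) % 2 = x % 2 := by omega
      have hd : (x + 2 ^ (d + 1)) / 2 = x / 2 + 2 ^ d := by omega
      rw [hc, pvCombo_succ _ (d + 1), natCast_mod_two, natCast_div_two, hm, hd]
      rw [show ((x / 2 + 2 ^ d : Nat) : Int) = ((x / 2 : Nat) : Int) + 2 ^ d from by push_cast; ring]
      rw [ih _ hx2, pvCombo_succ _ d, natCast_mod_two, natCast_div_two]
      simp

lemma alt_neg (m n : Int) (pl : List Int) (h : m + 1 - (pl.length : Int) < 0) :
    littlewood_alt m n pl = [] := by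
  simp only [littlewood_alt]; rw [if_pos (Or.inl h)]

lemma alt_big (m n : Int) (pl : List Int) (h1 : 0 < m + 1 - (pl.length : Int))
    (h2 : n + 1 < m + 1 - (pl.length : Int)) : littlewood_alt m n pl = [] := by
  simp only [littlewood_alt]; rw [if_pos (Or.inr ⟨h1, h2⟩)]

lemma alt_zero (m n : Int) (pl : List Int) (h : (pl.length : Int) = m + 1) :
    littlewood_alt m n pl = [pl.reverse] := by
  simp only [littlewood_alt]
  rw [show m + 1 - (pl.length : Int) = 0 from by omega]
  rw [if_neg (by norm_num)]
  norm_num [PySem.List.pyRange_one]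
  rfl

lemma toNat_two_pow (k : Nat) : ((2 : Int) ^ k).toNat = 2 ^ k := by
  rw [show (2 : Int) ^ k = ((2 ^ k : Nat) : Int) from by push_cast; ring, Int.toNat_natCast]

lemma alt_map (m n : Int) (pl : List Int) (d' : Nat)
    (hd : m + 1 - (pl.length : Int) = (d' : Int))
    (hg : ¬ (0 < (d' : Int) ∧ n + 1 < (d' : Int))) :
    littlewood_alt m n pl
      = (List.range (2 ^ d')).map (fun (k : Nat) => pvCombo (k : Int) d' ++ pl.reverse) := by
  simp only [littlewood_alt]
  have hneg : ¬ (((d' : Nat) : Int) < 0 ∨ (0 < ((d' : Nat) : Int) ∧ n + 1 < ((d' : Nat) : Int))) := by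
    intro hcon
    rcases hcon with h | h
    · omega
    · exact hg h
  rw [hd, if_neg hneg]
  rw [Int.toNat_natCast, PySem.List.pyRange_one, List.map_map]
  rw [show ((2 : Int) ^ d' - 0).toNat = 2 ^ d' from by rw [sub_zero, toNat_two_pow]]
  refine List.map_congr_left fun k _ => ?_
  simp

lemma len_append_one (pl : List Int) (c : Int) : (((pl ++ [c]).length : Nat) : Int) = (pl.length : Int) + 1 := by
  simp

lemma alt_step (m n : Int) (pl : List Int)
    (hd : 0 < m + 1 - (pl.length : Int)) (hg : m + 1 - (pl.length : Int) ≤ n + 1) :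
    littlewood_alt m n pl
      = littlewood_alt m (n - 1) (pl ++ [1]) ++ littlewood_alt m (n - 1) (pl ++ [-1]) := by
  obtain ⟨d', hd'⟩ : ∃ d' : Nat, m + 1 - (pl.length : Int) = ((d' + 1 : Nat) : Int) :=
    ⟨(m - pl.length).toNat, by omega⟩
  have hchild : ∀ c : Int, m + 1 - ((pl ++ [c]).length : Int) = ((d' : Nat) : Int) := by
    intro c; rw [len_append_one]; push_cast at hd' ⊢; omega
  have hgc : ¬ (0 < ((d' : Nat) : Int) ∧ n - 1 + 1 < ((d' : Nat) : Int)) := by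
    push_cast at hd' ⊢; omega
  rw [alt_map m n pl (d' + 1) (by exact_mod_cast hd') (by push_cast at hd' ⊢; omega)]
  rw [alt_map m (n - 1) (pl ++ [1]) d' (hchild 1) hgc]
  rw [alt_map m (n - 1) (pl ++ [-1]) d' (hchild (-1)) hgc]
  rw [show 2 ^ (d' + 1) = 2 ^ d' + 2 ^ d' from by ring, List.range_add, List.map_append]
  congr 1
  · refine List.map_congr_left fun k hk => ?_
    rw [pvCombo_low d' k (List.mem_range.mp hk)]
    simp
  · rw [List.map_map]
    refine List.map_congr_left fun k hk => ?_
    have : ((2 ^ d' + k : Nat) : Int) = ((k : Nat) : Int) + 2 ^ d' := by push_cast; ring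
    simp only [Function.comp]
    rw [this, pvCombo_high d' k (List.mem_range.mp hk)]
    simp

lemma A_base (m n : Int) (pl : List Int) (hn : n < 0) :
    littlewood m n pl = littlewood_alt m n pl := by
  rw [littlewood]
  simp only [if_pos hn]
  by_cases hlen : (pl.length : Int) = m + 1
  · rw [if_pos hlen, alt_zero m n pl hlen]
  · rw [if_neg hlen]
    rcases lt_or_gt_of_ne (fun h : m + 1 - (pl.length : Int) = 0 => hlen (by omega)) with h | h
    · rw [alt_neg m n pl h]
    · rw [alt_big m n pl h (by omega)]

lemma main_lemma (m : Int) (k : Nat) : ∀ (n : Int) (pl : List Int), (n + 1).toNat ≤ k →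
    littlewood m n pl = littlewood_alt m n pl := by
  induction k with
  | zero => intro n pl h; exact A_base m n pl (by omega)
  | succ k ih =>
      intro n pl h
      by_cases hn : n < 0
      · exact A_base m n pl hn
      · rw [littlewood]
        simp only [if_neg hn]
        have hrec : ∀ c : Int, littlewood m (n - 1) (pl ++ [c]) = littlewood_alt m (n - 1) (pl ++ [c]) :=
          fun c => ih (n - 1) (pl ++ [c]) (by omega)
        rw [hrec 1, hrec (-1)]
        by_cases hlen : (pl.length : Int) = m + 1
        · rw [if_pos hlen]
          have hc : ∀ c : Int, m + 1 - ((pl ++ [c]).length : Int) < 0 := by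
            intro c; rw [len_append_one]; omega
          rw [alt_neg _ _ _ (hc 1), alt_neg _ _ _ (hc (-1)), alt_zero m n pl hlen]
          simp
        · rw [if_neg hlen]
          simp only [List.nil_append]
          rcases lt_or_gt_of_ne (fun h : m + 1 - (pl.length : Int) = 0 => hlen (by omega)) with hd | hd
          · have hc : ∀ c : Int, m + 1 - ((pl ++ [c]).length : Int) < 0 := by
              intro c; rw [len_append_one]; omega
            rw [alt_neg _ _ _ (hc 1), alt_neg _ _ _ (hc (-1)), alt_neg m n pl hd]
            simp
          · by_cases hbig : n + 1 < m + 1 - (pl.length : Int)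
            · have hc : ∀ c : Int, littlewood_alt m (n - 1) (pl ++ [c]) = [] := by
                intro c
                exact alt_big _ _ _ (by rw [len_append_one]; omega) (by rw [len_append_one]; omega)
              rw [hc 1, hc (-1), alt_big m n pl hd hbig]
              simp
            · rw [← alt_step m n pl hd (by omega)]

theorem littlewood_spec : Claim_equal_littlewood := by
  intro m n pl _ _
  exact main_lemma m (n + 1).toNat n pl le_rfl
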